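-- pv_equiv track=rewrite | github.com/milanvarghese/LSTM-from-Scratch-using-Numpy | src/bpe.py | tokenize_with_bpe
-- ===== SOURCE A (Python) =====
-- from collections import Counter
--
-- def get_pair_frequencies(tokens):
--     """Compute frequencies of adjacent token pairs."""
--     pairs = [tuple(tokens[i:i+2]) for i in range(len(tokens) - 1)]
--     return Counter(pairs)
--
-- def merge_pair(tokens, pair, new_token):
--     """Merge the most frequent pair in the token list."""
--     merged_tokens = []
--     i = 0
--     while i < len(tokens):
--         if i < len(tokens) - 1 and (tokens[i], tokens[i+1]) == pair:
--             merged_tokens.append(new_token)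
--             i += 2  # Skip next token as it's merged
--         else:
--             merged_tokens.append(tokens[i])
--             i += 1
--     return merged_tokens
--
-- def tokenize_with_bpe(text, merges):
--     """Tokenizes text using learned BPE merges."""
--     tokens = list(text)  # Start with character-level tokens
--
--     # Apply stored merges in order
--     while True:
--         pair_freqs = get_pair_frequencies(tokens)
--         if not pair_freqs:
--             break
--
--         merge_candidates = [(pair, merges[pair]) for pair in pair_freqs if pair in merges]
--         if not merge_candidates:
--             break
--
--         # Apply the first merge in stored order
--         pair_to_merge, new_token = merge_candidates[0]
--         tokens = merge_pair(tokens, pair_to_merge, new_token)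
--
--     return tokens
-- ===== SOURCE B (Python) =====
-- def tokenize_with_bpe(text, merges):
--     """Tokenizes text using learned BPE merges.
--
--     Simpler rewrite: instead of building a Counter of pair frequencies each
--     round, scan once left-to-right for the first adjacent pair present in
--     merges (the same pair Counter's insertion order selects), merge all its
--     occurrences, and repeat until no adjacent pair is a merge key."""
--     tokens = list(text)
--     while True:
--         found = None
--         for a, b in zip(tokens, tokens[1:]):
--             if (a, b) in merges:
--                 found = ((a, b), merges[(a, b)])
--                 break
--         if found is None:
--             return tokens
--         pair, new_token = found
--         out = []
--         rest = tokens
--         while len(rest) >= 2: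
--             if (rest[0], rest[1]) == pair:
--                 out.append(new_token)
--                 rest = rest[2:]
--             else:
--                 out.append(rest[0])
--                 rest = rest[1:]
--         out += rest
--         tokens = out
-- ===== Notes on version B (the rewrite author's own statement) =====
-- stated objective: simpler
-- what changed: Each round, instead of building a Counter of all adjacent-pair frequencies and a full candidate list, B scans tokens left-to-right for the first adjacent pair that is a merges key (the same pair Counter insertion order selects) and merges its occurrences.
import Mathlib
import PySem

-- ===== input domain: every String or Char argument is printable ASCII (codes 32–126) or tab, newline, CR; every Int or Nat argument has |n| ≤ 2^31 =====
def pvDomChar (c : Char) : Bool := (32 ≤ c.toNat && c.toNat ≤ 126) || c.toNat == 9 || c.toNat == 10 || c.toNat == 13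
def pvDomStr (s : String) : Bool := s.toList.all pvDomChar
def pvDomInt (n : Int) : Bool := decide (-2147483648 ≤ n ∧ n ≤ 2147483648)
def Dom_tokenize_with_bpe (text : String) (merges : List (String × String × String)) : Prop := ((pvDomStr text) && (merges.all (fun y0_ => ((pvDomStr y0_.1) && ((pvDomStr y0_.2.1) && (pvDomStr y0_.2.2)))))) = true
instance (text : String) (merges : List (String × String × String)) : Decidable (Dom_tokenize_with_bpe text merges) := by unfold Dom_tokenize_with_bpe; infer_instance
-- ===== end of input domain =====

-- B drops the per-round Counter of pair frequencies and instead scans directly for the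
-- first adjacent pair present in merges (objective: simpler, constant-factor cheaper rounds).
-- `merges[pair]` / `pair in merges` on the association list = first match (shared by both ports):
def mergesGet? (merges : List (String × String × String)) (p : String × String) : Option String :=
  (merges.find? (fun e => e.1 == p.1 && e.2.1 == p.2)).map (·.2.2)

-- ===== PORT A =====
-- pairs = [tuple(tokens[i:i+2]) for i in range(len(tokens)-1)]; the 2-slice at i ≤ len-2 is
-- exactly the pair (tokens[i], tokens[i+1]), ported via pyGetD (indices are in range).
def get_pair_frequencies (tokens : List String) : PySem.Dict (String × String) Int :=
  PySem.Dict.counter ((PySem.List.pyRange 0 ((tokens.length : Int) - 1) 1).map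
    (fun i => (PySem.List.pyGetD tokens i "", PySem.List.pyGetD tokens (i + 1) "")))

-- the while-loop of merge_pair, index i and accumulator merged_tokens
def merge_pair_go (tokens : List String) (pair : String × String) (new_token : String)
    (i : Nat) (acc : List String) : List String :=
  if i < tokens.length then
    if i < tokens.length - 1 ∧ (tokens.getD i "", tokens.getD (i + 1) "") = pair then
      merge_pair_go tokens pair new_token (i + 2) (acc ++ [new_token])
    else
      merge_pair_go tokens pair new_token (i + 1) (acc ++ [tokens.getD i ""])
  else acc
termination_by tokens.length - i

def merge_pair (tokens : List String) (pair : String × String) (new_token : String) : List String :=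
  merge_pair_go tokens pair new_token 0 []

-- the `while True` loop; each merging round shortens tokens by ≥ 1, so fuel = len(text)+1
-- rounds are never exhausted and the port computes exactly what the unbounded loop does
def bpe_loop (merges : List (String × String × String)) : Nat → List String → List String
  | 0, tokens => tokens
  | fuel + 1, tokens =>
    let pair_freqs := get_pair_frequencies tokens
    if pair_freqs.size = 0 then tokens
    else
      let merge_candidates := pair_freqs.keys.filterMap
        (fun p => (mergesGet? merges p).map (fun v => (p, v)))
      match merge_candidates with
      | [] => tokens
      | (pair_to_merge, new_token) :: _ =>
          bpe_loop merges fuel (merge_pair tokens pair_to_merge new_token)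

def tokenize_with_bpe (text : String) (merges : List (String × String × String)) : List String :=
  bpe_loop merges (text.toList.length + 1) (text.toList.map (fun c => String.ofList [c]))

-- ===== PORT B =====
-- scan for the first adjacent pair that is a key of merges
def findMergeB (merges : List (String × String × String)) : List String → Option ((String × String) × String)
  | a :: b :: rest =>
    match mergesGet? merges (a, b) with
    | some v => some ((a, b), v)
    | none => findMergeB merges (b :: rest)
  | _ => none

-- merge every occurrence of pair (B's inner while over `rest`)
def mergeAllB (pair : String × String) (new_token : String) : List String → List String
  | a :: b :: rest =>
    if (a, b) = pair then new_token :: mergeAllB pair new_token rest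
    else a :: mergeAllB pair new_token (b :: rest)
  | l => l
termination_by l => l.length

def bpe_loop_alt (merges : List (String × String × String)) : Nat → List String → List String
  | 0, tokens => tokens
  | fuel + 1, tokens =>
    match findMergeB merges tokens with
    | none => tokens
    | some (pair, new_token) => bpe_loop_alt merges fuel (mergeAllB pair new_token tokens)

def tokenize_with_bpe_alt (text : String) (merges : List (String × String × String)) : List String :=
  bpe_loop_alt merges (text.toList.length + 1) (text.toList.map (fun c => String.ofList [c]))

-- ===== PRECONDITION & SPEC =====
def Spec_tokenize_with_bpe (text : String) (merges : List (String × String × String)) (out : List String) : Prop := out = tokenize_with_bpe_alt text merges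
instance (text : String) (merges : List (String × String × String)) (out : List String) : Decidable (Spec_tokenize_with_bpe text merges out) := by unfold Spec_tokenize_with_bpe; infer_instance

-- ===== CLAIM (what is proved, stated in full; the proofs are below) =====
def Claim_equal_tokenize_with_bpe : Prop := ∀ (text : String) (merges : List (String × String × String)), Dom_tokenize_with_bpe text merges → Spec_tokenize_with_bpe text merges (tokenize_with_bpe text merges)

-- ===== LEMMAS AND PROOFS =====

-- A's pair list is the zip of tokens with its tail
theorem pairsA_eq_zip (tokens : List String) :
    (PySem.List.pyRange 0 ((tokens.length : Int) - 1) 1).map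
      (fun i => (PySem.List.pyGetD tokens i "", PySem.List.pyGetD tokens (i + 1) ""))
      = tokens.zip tokens.tail := by
  rw [PySem.List.pyRange_one]
  apply List.ext_getElem
  · simp [List.length_zip]
  · intro k h1 h2
    simp only [List.getElem_map, List.getElem_range, List.getElem_zip, List.getElem_tail]
    have hk : k < tokens.length - 1 := by simpa [List.length_zip] using h2
    have e1 : ((0:Int) + (k:Int)) = ((k:Nat) : Int) := by ring
    have e2 : ((k:Int) + 1) = (((k+1:Nat)) : Int) := by push_cast; ring
    rw [e1, e2, PySem.List.pyGetD_natCast, PySem.List.pyGetD_natCast,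
      List.getD_eq_getElem _ _ (by omega), List.getD_eq_getElem _ _ (by omega)]

-- elements mapped to none by f may be dropped without changing f's hits
theorem filterMap_discard {α β : Type} [BEq α] [LawfulBEq α] (f : α → Option β) (x : α)
    (hx : f x = none) (s : List α) : (PySem.Set.discard s x).filterMap f = s.filterMap f := by
  induction s with
  | nil => simp [PySem.Set.discard]
  | cons a t ih =>
    by_cases h : a = x
    · subst h; simpa [PySem.Set.discard, hx] using ih
    · simp [PySem.Set.discard, h, List.filterMap_cons] at *
      cases f a <;> simp [ih]

-- deduplication (Counter key order = first occurrences) does not change the first hit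
theorem head_filterMap_ofList {α β : Type} [BEq α] [LawfulBEq α] (f : α → Option β) (l : List α) :
    ((PySem.Set.ofList l).filterMap f).head? = (l.filterMap f).head? := by
  induction l with
  | nil => rfl
  | cons a t ih =>
    rw [PySem.Set.ofList_cons]
    simp only [List.filterMap_cons]
    cases hfa : f a with
    | some v => simp
    | none => simpa [filterMap_discard f a hfa] using ih

-- B's scan computes the first hit of the zip pair list
theorem findMergeB_eq (merges : List (String × String × String)) (tokens : List String) :
    findMergeB merges tokens
      = ((tokens.zip tokens.tail).filterMap
          (fun p => (mergesGet? merges p).map (fun v => (p, v)))).head? := by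
  induction tokens with
  | nil => rfl
  | cons a t ih =>
    cases t with
    | nil => rfl
    | cons b rest =>
      rw [findMergeB]
      cases h : mergesGet? merges (a, b) with
      | some v => simp [h]
      | none => simpa [List.filterMap_cons, h] using ih

-- A's index-based merge loop = B's structural merge
theorem merge_pair_go_eq (tokens : List String) (pair : String × String) (nt : String) :
    ∀ (i : Nat) (acc : List String),
    merge_pair_go tokens pair nt i acc = acc ++ mergeAllB pair nt (tokens.drop i) := by
  intro i
  induction hi : tokens.length - i using Nat.strong_induction_on generalizing i with
  | _ n IH =>
  intro acc
  rw [merge_pair_go]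
  by_cases h : i < tokens.length
  · have hdrop : tokens.drop i = tokens[i] :: tokens.drop (i + 1) :=
      List.drop_eq_getElem_cons h
    have g1 : tokens.getD i "" = tokens[i] := List.getD_eq_getElem _ _ h
    by_cases h2 : i + 1 < tokens.length
    · have hdrop2 : tokens.drop (i + 1) = tokens[i+1] :: tokens.drop (i + 2) :=
        List.drop_eq_getElem_cons h2
      have hc : (i < tokens.length - 1) := by omega
      have g2 : tokens.getD (i+1) "" = tokens[i+1] := List.getD_eq_getElem _ _ h2
      by_cases hp : (tokens[i], tokens[i+1]) = pair
      · rw [if_pos h, if_pos ⟨hc, by rw [g1, g2]; exact hp⟩,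
          IH _ (by omega) _ rfl, hdrop, hdrop2, mergeAllB, if_pos hp]
        simp
      · rw [if_pos h, if_neg (by rw [g1, g2]; tauto),
          IH _ (by omega) _ rfl, hdrop, hdrop2, mergeAllB, if_neg hp, ← hdrop2]
        simp [List.getElem?_eq_getElem h]
    · have hnil : tokens.drop (i + 1) = [] := List.drop_eq_nil_of_le (by omega)
      rw [if_pos h, if_neg (by rintro ⟨h1, _⟩; omega), IH _ (by omega) _ rfl,
        hnil, hdrop, hnil]
      simp [mergeAllB, List.getElem?_eq_getElem h]
  · rw [if_neg h, List.drop_eq_nil_of_le (by omega)]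
    simp [mergeAllB]

-- one candidate-selection chain: A's first merge candidate = B's scan result
theorem candidates_head_eq (merges : List (String × String × String)) (tokens : List String) :
    ((get_pair_frequencies tokens).keys.filterMap
        (fun p => (mergesGet? merges p).map (fun v => (p, v)))).head?
      = findMergeB merges tokens := by
  rw [get_pair_frequencies, PySem.Dict.keys_counter, pairsA_eq_zip,
    head_filterMap_ofList, findMergeB_eq]

theorem loop_eq (merges : List (String × String × String)) (fuel : Nat) (tokens : List String) :
    bpe_loop merges fuel tokens = bpe_loop_alt merges fuel tokens := by
  induction fuel generalizing tokens with
  | zero => rfl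
  | succ fuel ih =>
    rw [bpe_loop, bpe_loop_alt]
    have hcand := candidates_head_eq merges tokens
    cases hf : findMergeB merges tokens with
    | none =>
      rw [hf] at hcand
      have hc : (get_pair_frequencies tokens).keys.filterMap
          (fun p => (mergesGet? merges p).map (fun v => (p, v))) = [] :=
        List.head?_eq_none_iff.mp hcand
      by_cases hs : (get_pair_frequencies tokens).size = 0
      · simp [hs]
      · simp [hs, hc]
    | some pv =>
      obtain ⟨p, nt⟩ := pv
      rw [hf] at hcand
      cases hcl : (get_pair_frequencies tokens).keys.filterMap
          (fun p => (mergesGet? merges p).map (fun v => (p, v))) with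
      | nil => rw [hcl] at hcand; simp at hcand
      | cons q rest =>
        rw [hcl] at hcand
        simp only [List.head?_cons, Option.some.injEq] at hcand
        have hs : ¬ (get_pair_frequencies tokens).size = 0 := by
          intro hs0
          have : (get_pair_frequencies tokens).keys = [] := by
            have := hs0
            unfold PySem.Dict.size at this
            unfold PySem.Dict.keys
            simp [List.length_eq_zero_iff.mp this]
          rw [this] at hcl
          simp at hcl
        simp only [hs, if_false, hcand]
        rw [merge_pair, merge_pair_go_eq]
        simpa using ih (mergeAllB p nt tokens)

-- ===== VERDICT (by name: the statement is the Claim_ definition above) =====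
theorem tokenize_with_bpe_spec : Claim_equal_tokenize_with_bpe := by
  intro text merges _
  unfold Spec_tokenize_with_bpe tokenize_with_bpe tokenize_with_bpe_alt
  exact loop_eq merges _ _
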